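-- pv_equiv track=rewrite | github.com/ghrst/ds-algorithms | threeway-set-disjointness.py | disjoint_quadratic
-- ===== SOURCE A (Python) =====
-- def disjoint_quadratic(A, B, C):
--     for a in A:
--         for b in B:
--             if a == b:
--                 for c in C:
--                     if b == c:
--                         return False
--     return True
-- ===== SOURCE B (Python) =====
-- def disjoint_quadratic(A, B, C):
--     ab = set(A) & set(B)
--     for c in C:
--         if c in ab:
--             return False
--     return True
-- ===== Notes on version B (the rewrite author's own statement) =====
-- stated objective: faster
-- what changed: Replaces the triple nested scan by building a hash-set index ab = set(A) & set(B) once and then making a single pass over C, returning False on the first element found in ab.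
import Mathlib
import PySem

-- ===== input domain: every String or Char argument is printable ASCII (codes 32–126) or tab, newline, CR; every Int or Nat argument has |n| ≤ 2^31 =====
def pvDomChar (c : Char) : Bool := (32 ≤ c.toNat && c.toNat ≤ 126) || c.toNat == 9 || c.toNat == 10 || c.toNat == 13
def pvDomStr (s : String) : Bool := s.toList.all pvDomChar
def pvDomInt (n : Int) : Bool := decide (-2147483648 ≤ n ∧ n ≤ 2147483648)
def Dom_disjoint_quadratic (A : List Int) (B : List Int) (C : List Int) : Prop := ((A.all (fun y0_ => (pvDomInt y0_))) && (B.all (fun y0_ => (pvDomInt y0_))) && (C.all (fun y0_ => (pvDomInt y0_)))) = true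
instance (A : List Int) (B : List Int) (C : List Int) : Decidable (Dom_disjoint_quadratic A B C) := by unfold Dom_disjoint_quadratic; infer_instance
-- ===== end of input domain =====

-- ===== PORT A =====
-- A: triple nested loops; return False on the first a=b=c found.
def disjoint_quadratic (A : List Int) (B : List Int) (C : List Int) : Bool :=
  !(A.any (fun a => B.any (fun b => a == b && C.any (fun c => b == c))))

-- ===== PORT B =====
-- B: build the pairwise intersection set once, then one pass over C (return value only; faster in a timing run's mechanism claim in claim.json).
def disjoint_quadratic_alt (A : List Int) (B : List Int) (C : List Int) : Bool :=
  let ab := PySem.Set.inter (PySem.Set.ofList A) (PySem.Set.ofList B)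
  !(C.any (fun c => PySem.Set.contains ab c))

-- ===== PRECONDITION & SPEC =====
def Spec_disjoint_quadratic (A : List Int) (B : List Int) (C : List Int) (out : Bool) : Prop := out = disjoint_quadratic_alt A B C
instance (A : List Int) (B : List Int) (C : List Int) (out : Bool) : Decidable (Spec_disjoint_quadratic A B C out) := by unfold Spec_disjoint_quadratic; infer_instance

-- ===== CLAIM (what is proved, stated in full; the proofs are below) =====
def Claim_equal_disjoint_quadratic : Prop := ∀ (A : List Int) (B : List Int) (C : List Int), Dom_disjoint_quadratic A B C → Spec_disjoint_quadratic A B C (disjoint_quadratic A B C)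

-- ===== LEMMAS AND PROOFS =====

-- ===== VERDICT (by name: the statement is the Claim_ definition above) =====
theorem disjoint_quadratic_spec : Claim_equal_disjoint_quadratic := by
  intro A B C _
  unfold Spec_disjoint_quadratic disjoint_quadratic disjoint_quadratic_alt
  congr 1
  rw [Bool.eq_iff_iff]
  simp only [List.any_eq_true, PySem.Set.contains_iff, PySem.Set.mem_inter,
    PySem.Set.mem_ofList, Bool.and_eq_true, beq_iff_eq]
  constructor
  · rintro ⟨a, ha, b, hb, rfl, c, hc, rfl⟩
    exact ⟨a, hc, ha, hb⟩
  · rintro ⟨c, hc, hA, hB⟩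
    exact ⟨c, hA, c, hB, rfl, c, hc, rfl⟩
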